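-- pv_equiv track=rewrite | github.com/ucse-ia/ucse_ia | 2021/eight_puzzle.py | result
-- ===== SOURCE A (Python) =====
-- def where_is(piece, state):
--     """
--     Find a piece in the board, and return the row and column indexes.
--     """
--     for row_index, row in enumerate(state):
--         for col_index, current_piece in enumerate(row):
--             if current_piece == piece:
--                 return row_index, col_index
--
-- def result(state, action):
--     empty_row, empty_col = where_is(0, state)
--     piece_row, piece_col = where_is(action, state)
--
--     state_as_lists = list(list(row) for row in state)
--
--     state_as_lists[empty_row][empty_col] = action
--     state_as_lists[piece_row][piece_col] = 0
--
--     new_state = tuple(tuple(row) for row in state_as_lists)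
--
--     return new_state
-- ===== SOURCE B (Python) =====
-- def result(state, action):
--     # Work in the flattened 1-D board: find the two flat positions with
--     # list.index, swap the two entries, then slice the flat list back into rows.
--     flat = [v for row in state for v in row]
--     i = flat.index(0)        # ValueError if there is no empty tile
--     j = flat.index(action)   # ValueError if the piece is absent
--     flat[i], flat[j] = flat[j], flat[i]
--     new_rows = []
--     for row in state:
--         new_rows.append(tuple(flat[:len(row)]))
--         flat = flat[len(row):]
--     return tuple(new_rows)
-- ===== Notes on version B (the rewrite author's own statement) =====
-- stated objective: alternative
-- what changed: B works in the flattened 1-D board: list.index finds the two flat positions, a tuple swap exchanges the entries, and the flat list is sliced back into rows, instead of A's nested enumerate scans for 2-D coordinates plus two indexed writes on a copied board.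
import Mathlib
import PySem

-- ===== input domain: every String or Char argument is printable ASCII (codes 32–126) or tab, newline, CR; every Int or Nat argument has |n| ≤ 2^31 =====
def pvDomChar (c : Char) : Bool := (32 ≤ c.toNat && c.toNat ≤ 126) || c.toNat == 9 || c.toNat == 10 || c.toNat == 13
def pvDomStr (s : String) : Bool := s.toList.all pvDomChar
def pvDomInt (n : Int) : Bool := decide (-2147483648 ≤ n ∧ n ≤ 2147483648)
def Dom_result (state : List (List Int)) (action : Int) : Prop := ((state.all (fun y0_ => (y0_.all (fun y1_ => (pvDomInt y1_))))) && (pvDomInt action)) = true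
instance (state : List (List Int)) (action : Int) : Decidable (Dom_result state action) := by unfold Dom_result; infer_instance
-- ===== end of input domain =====

-- B works in the flattened 1-D board (list.index, one swap, slice back into rows)
-- instead of A's 2-D coordinate scans plus indexed writes on a copied board.

-- ===== PORT A =====
-- inner loop of where_is: first column index of `piece` in `row`, counter c
def findCol (piece : Int) : List Int → Int → Option Int
  | [], _ => none
  | x :: xs, c => if x = piece then some c else findCol piece xs (c + 1)

-- outer loop of where_is, row counter r (returns none = Python's implicit None)
def whereIsAux (piece : Int) : List (List Int) → Int → Option (Int × Int)
  | [], _ => none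
  | row :: rest, r =>
    match findCol piece row 0 with
    | some c => some (r, c)
    | none => whereIsAux piece rest (r + 1)

def whereIs (piece : Int) (state : List (List Int)) : Option (Int × Int) :=
  whereIsAux piece state 0

-- state_as_lists[r][c] = v ; indices produced by where_is are always ≥ 0 and in
-- range, so .toNat/modify/set is exact for every reachable call
def setCell (s : List (List Int)) (r c : Int) (v : Int) : List (List Int) :=
  s.modify r.toNat (fun row => row.set c.toNat v)

def result (state : List (List Int)) (action : Int) : List (List Int) :=
  match whereIs 0 state, whereIs action state with
  | some (er, ec), some (pr, pc) =>
      setCell (setCell state er ec action) pr pc 0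
  | _, _ => []  -- unreachable under Pre_result (Python raises TypeError here)

-- ===== PORT B =====
-- the regroup loop: new_rows.append(tuple(flat[:len(row)])); flat = flat[len(row):]
-- (both slice bounds are the nonnegative len(row), where slicing IS take/drop)
def regroup : List (List Int) → List Int → List (List Int)
  | [], _ => []
  | row :: rest, fl => fl.take row.length :: regroup rest (fl.drop row.length)

def result_alt (state : List (List Int)) (action : Int) : List (List Int) :=
  let flat := state.flatten
  -- i = flat.index(0); j = flat.index(action): none = Python's ValueError,
  -- unreachable under Pre_result
  (PySem.List.index? flat 0).elim [] (fun i =>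
    (PySem.List.index? flat action).elim [] (fun j =>
      -- flat[i], flat[j] = flat[j], flat[i]; i and j come from .index, so they
      -- are in range and getD/set are exact
      regroup state ((flat.set i (flat.getD j 0)).set j (flat.getD i 0))))

-- ===== PRECONDITION & SPEC =====
-- Pre_ excludes exactly the boards missing a 0 tile or the requested piece:
-- there A raises TypeError (unpacking where_is's None) and B raises ValueError
-- (from list.index).
def Pre_result (state : List (List Int)) (action : Int) : Prop :=
  0 ∈ state.flatten ∧ action ∈ state.flatten
instance (state : List (List Int)) (action : Int) : Decidable (Pre_result state action) := by
  unfold Pre_result; infer_instance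

def pvWitness_result : List (List Int) × Int := ([[1, 2, 3], [4, 0, 5], [6, 7, 8]], 5)

def Spec_result (state : List (List Int)) (action : Int) (out : List (List Int)) : Prop := out = result_alt state action
instance (state : List (List Int)) (action : Int) (out : List (List Int)) : Decidable (Spec_result state action out) := by unfold Spec_result; infer_instance

-- ===== CLAIM (what is proved, stated in full; the proofs are below) =====
def Claim_equal_result : Prop := ∀ (state : List (List Int)) (action : Int), Dom_result state action → Pre_result state action → Spec_result state action (result state action)

-- ===== LEMMAS AND PROOFS =====

-- where_is finds the piece exactly when it is on the board
lemma findCol_none_iff (q : Int) (row : List Int) :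
    ∀ c, findCol q row c = none ↔ q ∉ row := by
  induction row with
  | nil => intro c; simp [findCol]
  | cons x xs ih =>
    intro c
    rw [findCol]
    by_cases h : x = q
    · simp [h]
    · simp [h, ih (c + 1), Ne.symm h]

lemma whereIsAux_none_iff (q : Int) (rows : List (List Int)) :
    ∀ r, whereIsAux q rows r = none ↔ q ∉ rows.flatten := by
  induction rows with
  | nil => intro r; simp [whereIsAux]
  | cons row rest ih =>
    intro r
    rw [whereIsAux]
    rcases hf : findCol q row 0 with _ | c
    · have := (findCol_none_iff q row 0).mp hf
      simp [ih (r + 1), this]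
    · have : q ∈ row := by
        by_contra hq
        rw [(findCol_none_iff q row 0).mpr hq] at hf; cases hf
      simp [this]

-- the Int column counter of where_is against list.index on the row
lemma findCol_index (q : Int) (row : List Int) :
    ∀ (c0 cc : Int), findCol q row c0 = some cc →
      ∃ k : Nat, PySem.List.index? row q = some k ∧ cc = c0 + k := by
  induction row with
  | nil => intro c0 cc h; simp [findCol] at h
  | cons x xs ih =>
    intro c0 cc h
    rw [findCol] at h
    by_cases hx : x = q
    · rw [if_pos hx] at h
      cases h
      subst hx
      exact ⟨0, PySem.List.index?_cons_self x xs, by simp⟩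
    · rw [if_neg hx] at h
      obtain ⟨k, hk, hcc⟩ := ih (c0 + 1) cc h
      refine ⟨k + 1, ?_, by push_cast; omega⟩
      rw [PySem.List.index?_cons_of_ne xs hx, hk]
      rfl

-- where_is splits the board at the found row
lemma whereIs_decomp (q : Int) (rows : List (List Int)) :
    ∀ (r0 tr tc : Int), whereIsAux q rows r0 = some (tr, tc) →
      ∃ rp rw rs, rows = rp ++ rw :: rs ∧ tr = r0 + rp.length ∧
        q ∉ rp.flatten ∧ findCol q rw 0 = some tc := by
  induction rows with
  | nil => intro r0 tr tc h; simp [whereIsAux] at h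
  | cons row rest ih =>
    intro r0 tr tc h
    rw [whereIsAux] at h
    rcases hf : findCol q row 0 with _ | c
    · rw [hf] at h
      obtain ⟨rp, rw', rs, hsplit, htr, hnm, hfc⟩ := ih (r0 + 1) tr tc h
      refine ⟨row :: rp, rw', rs, by simp [hsplit], by simp; omega, ?_, hfc⟩
      simpa [(findCol_none_iff q row 0).mp hf] using hnm
    · rw [hf] at h
      cases h
      exact ⟨[], row, rest, rfl, by simp, by simp, hf⟩

-- list.index pushed through an append whose prefix misses the value
lemma index?_append_not_mem (q : Int) (L : List Int) :
    ∀ (T : List Int), q ∉ L →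
      PySem.List.index? (L ++ T) q = (PySem.List.index? T q).map (· + L.length) := by
  induction L with
  | nil =>
    intro T _
    simp only [List.nil_append, List.length_nil]
    cases PySem.List.index? T q
    all_goals simp
  | cons x L' ih =>
    intro T hm
    have hx : x ≠ q := fun h => hm (h ▸ List.mem_cons_self)
    rw [List.cons_append, PySem.List.index?_cons_of_ne (L' ++ T) hx,
      ih T (fun h => hm (List.mem_cons_of_mem x h))]
    cases PySem.List.index? T q
    all_goals simp [List.length_cons, Nat.add_assoc]

-- the where_is coordinates name position flatPos in the flattened board,
-- and list.index on the flattened board finds exactly that position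
lemma whereIs_flat (q : Int) (state : List (List Int)) (tr tc : Int)
    (h : whereIsAux q state 0 = some (tr, tc)) :
    0 ≤ tr ∧ 0 ≤ tc ∧
    ∃ (hr : tr.toNat < state.length), tc.toNat < (state[tr.toNat]).length ∧
      PySem.List.index? state.flatten q
        = some ((state.take tr.toNat).flatten.length + tc.toNat) := by
  obtain ⟨rp, rw', rs, hsplit, htr, hnm, hfc⟩ := whereIs_decomp q state 0 tr tc h
  obtain ⟨k, hidx, hcc⟩ := findCol_index q rw' 0 tc hfc
  obtain ⟨hk, hval, _⟩ := PySem.List.getElem_of_index?_eq_some hidx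
  have htr' : tr.toNat = rp.length := by omega
  have htc' : tc.toNat = k := by omega
  have hrlen : tr.toNat < state.length := by
    subst hsplit; simp [htr']
  refine ⟨by omega, by omega, hrlen, ?_, ?_⟩
  · have : state[tr.toNat]'hrlen = rw' := by
      subst hsplit
      rw [List.getElem_of_append rfl htr'.symm]
    rw [this, htc']; exact hk
  · have htake : state.take tr.toNat = rp := by
      subst hsplit; rw [htr']; exact List.take_left
    rw [htake, hsplit]
    have hfl : (rp ++ rw' :: rs).flatten = rp.flatten ++ (rw' ++ rs.flatten) := by
      simp
    rw [hfl, index?_append_not_mem q rp.flatten (rw' ++ rs.flatten) hnm,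
      PySem.List.index?_append_of_mem rs.flatten (hval ▸ List.getElem_mem hk), hidx]
    simp [htc', Nat.add_comm]

-- one in-place write, seen through flatten
lemma flatten_modify_set (v : Int) :
    ∀ (s : List (List Int)) (ri ci : Nat) (hri : ri < s.length),
      ci < (s[ri]'hri).length →
      (s.modify ri (fun row => row.set ci v)).flatten
        = s.flatten.set ((s.take ri).flatten.length + ci) v := by
  intro s
  induction s with
  | nil => intro ri ci h; simp at h
  | cons row rest ih =>
    intro ri ci hri hci
    cases ri with
    | zero =>
      rw [List.modify_zero_cons]
      simp only [List.flatten_cons, List.take_zero, List.flatten_nil,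
        List.length_nil, Nat.zero_add]
      rw [List.set_append_left _ _ (by simpa using hci)]
    | succ n =>
      rw [List.modify_succ_cons]
      simp only [List.flatten_cons, List.take_succ_cons]
      rw [ih n ci (by simpa using hri) (by simpa using hci)]
      rw [List.length_append, Nat.add_assoc]
      simp

-- the writes never change the shape (each row keeps its length)
lemma map_length_modify_set (v : Int) :
    ∀ (s : List (List Int)) (ri ci : Nat),
      (s.modify ri (fun row => row.set ci v)).map List.length = s.map List.length := by
  intro s
  induction s with
  | nil => intro ri ci; simp
  | cons row rest ih =>
    intro ri ci
    cases ri with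
    | zero => simp [List.modify_zero_cons]
    | succ n => simp [List.modify_succ_cons, ih n ci]

-- regrouping the flattening of an equally-shaped board gives the board back
lemma regroup_flatten :
    ∀ (rows Y : List (List Int)), Y.map List.length = rows.map List.length →
      regroup rows Y.flatten = Y := by
  intro rows
  induction rows with
  | nil => intro Y h; cases Y with
    | nil => rfl
    | cons y ys => simp at h
  | cons r rs ih =>
    intro Y h
    cases Y with
    | nil => simp at h
    | cons y ys =>
      simp only [List.map_cons, List.cons.injEq] at h
      rw [List.flatten_cons, regroup, ← h.1, List.take_left, List.drop_left,
        ih ys h.2]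

-- ===== VERDICT (by name: the statement is the Claim_ definition above) =====
theorem result_spec : Claim_equal_result := by
  intro state action _dom hpre
  obtain ⟨h0, ha⟩ := hpre
  obtain ⟨⟨er, ec⟩, he⟩ : ∃ p, whereIs 0 state = some p := by
    rcases h : whereIs 0 state with _ | p
    · rw [whereIs] at h
      exact absurd h0 ((whereIsAux_none_iff 0 state 0).mp h)
    · exact ⟨p, rfl⟩
  obtain ⟨⟨pr, pc⟩, hp⟩ : ∃ p, whereIs action state = some p := by
    rcases h : whereIs action state with _ | p
    · rw [whereIs] at h
      exact absurd ha ((whereIsAux_none_iff action state 0).mp h)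
    · exact ⟨p, rfl⟩
  obtain ⟨her, hec, hrow0, hcol0, hidx0⟩ := whereIs_flat 0 state er ec he
  obtain ⟨hpr, hpc, hrowA, hcolA, hidxA⟩ := whereIs_flat action state pr pc hp
  -- flat positions and values
  set flat := state.flatten with hflat
  set i := (state.take er.toNat).flatten.length + ec.toNat with hi
  set j := (state.take pr.toNat).flatten.length + pc.toNat with hj
  obtain ⟨hilt, hival, _⟩ := PySem.List.getElem_of_index?_eq_some hidx0
  obtain ⟨hjlt, hjval, _⟩ := PySem.List.getElem_of_index?_eq_some hidxA
  -- A's board, seen through flatten and shape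
  have hs1flat : (setCell state er ec action).flatten = flat.set i action := by
    show (state.modify er.toNat (fun row => row.set ec.toNat action)).flatten = _
    rw [flatten_modify_set action state er.toNat ec.toNat hrow0 hcol0]
  have hs1shape : (setCell state er ec action).map List.length = state.map List.length :=
    map_length_modify_set action state er.toNat ec.toNat
  have hs1rowlen : ∀ (n : Nat) (hn : n < state.length),
      ((setCell state er ec action)[n]'(by simpa [setCell] using hn)).length
        = (state[n]'hn).length := by
    intro n hn
    have h1 : ((setCell state er ec action).map List.length)[n]'(by simpa [setCell] using hn)
        = ((state.map List.length)[n]'(by simpa using hn)) := by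
      simp only [hs1shape]
    simpa using h1
  have hs2flat : (setCell (setCell state er ec action) pr pc 0).flatten
      = (flat.set i action).set j 0 := by
    show ((setCell state er ec action).modify pr.toNat
        (fun row => row.set pc.toNat 0)).flatten = _
    rw [flatten_modify_set 0 (setCell state er ec action) pr.toNat pc.toNat
      (by simpa [setCell] using hrowA) (by rw [hs1rowlen pr.toNat hrowA]; exact hcolA)]
    rw [hs1flat]
    congr 1
    -- the write offset of (pr, pc) is unchanged by the first write
    rw [hj]
    have : ((setCell state er ec action).take pr.toNat).flatten.length
        = (state.take pr.toNat).flatten.length := by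
      rw [List.length_flatten, List.length_flatten, List.map_take, List.map_take,
        hs1shape]
    omega
  have hs2shape : (setCell (setCell state er ec action) pr pc 0).map List.length
      = state.map List.length := by
    have := map_length_modify_set 0 (setCell state er ec action) pr.toNat pc.toNat
    calc (setCell (setCell state er ec action) pr pc 0).map List.length
        = (setCell state er ec action).map List.length := this
      _ = state.map List.length := hs1shape
  -- both sides
  unfold Spec_result result result_alt
  rw [he, hp]
  simp only []
  rw [← hflat, hidx0, hidxA]
  change _ = regroup state ((flat.set i (flat.getD j 0)).set j (flat.getD i 0))
  rw [List.getD_eq_getElem flat 0 hjlt, List.getD_eq_getElem flat 0 hilt, hjval, hival]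
  rw [← hs2flat, regroup_flatten state _ hs2shape]
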